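-- pv_equiv track=rewrite | github.com/BLKSerene/Wordless | wordless_text/wordless_text_utils.py | to_sections
-- ===== SOURCE A (Python) =====
-- def to_sections(tokens, number_sections):
--     sections = []
--
--     section_size, remainder = divmod(len(tokens), number_sections)
--
--     for i in range(number_sections):
--         if i < remainder:
--             section_start = i * section_size + i
--         else:
--             section_start = i * section_size + remainder
--
--         if i + 1 < remainder:
--             section_stop = (i + 1) * section_size + i + 1
--         else:
--             section_stop = (i + 1) * section_size + remainder
--
--         sections.append(tokens[section_start:section_stop])
--
--     return sections
-- ===== SOURCE B (Python) =====
-- def to_sections(tokens, number_sections):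
--     section_size, remainder = divmod(len(tokens), number_sections)
--
--     sections = []
--     start = 0
--
--     # first the `remainder` longer sections, then the rest: no per-step branch
--     for _ in range(remainder):
--         stop = start + section_size + 1
--         sections.append(tokens[start:stop])
--         start = stop
--
--     for _ in range(number_sections - remainder):
--         stop = start + section_size
--         sections.append(tokens[start:stop])
--         start = stop
--
--     return sections
-- ===== Notes on version B (the rewrite author's own statement) =====
-- stated objective: simpler
-- what changed: Instead of recomputing each slice's start/stop from i with two if/else closed-form index expressions, B runs two branch-free cursor loops: first the `remainder` sections of size section_size+1, then the remaining sections of size section_size, advancing a running offset.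
import Mathlib
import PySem

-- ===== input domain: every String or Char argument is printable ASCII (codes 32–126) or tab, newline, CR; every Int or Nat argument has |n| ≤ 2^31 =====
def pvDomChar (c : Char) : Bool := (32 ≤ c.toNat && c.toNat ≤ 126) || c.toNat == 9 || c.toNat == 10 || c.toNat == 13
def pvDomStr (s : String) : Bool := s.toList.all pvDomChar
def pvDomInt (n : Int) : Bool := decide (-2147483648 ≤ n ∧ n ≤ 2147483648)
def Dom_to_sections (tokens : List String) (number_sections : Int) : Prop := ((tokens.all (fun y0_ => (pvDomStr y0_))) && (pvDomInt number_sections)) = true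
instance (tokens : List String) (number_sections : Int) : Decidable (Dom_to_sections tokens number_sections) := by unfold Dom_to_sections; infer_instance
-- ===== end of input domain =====

-- B replaces A's per-iteration closed-form index arithmetic (two if/else branches each step)
-- by two branch-free cursor loops: first the `remainder` longer sections, then the shorter ones
-- (objective: simpler; same cost).

-- ===== PORT A =====
def to_sections (tokens : List String) (number_sections : Int) : List (List String) :=
  match PySem.Int.divmod? (PySem.List.len tokens) number_sections with
  | none => []   -- ZeroDivisionError (number_sections = 0); excluded by Pre_
  | some (section_size, remainder) =>
    (PySem.List.pyRange 0 number_sections 1).foldl (fun sections i =>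
      let section_start := if i < remainder then i * section_size + i else i * section_size + remainder
      let section_stop := if i + 1 < remainder then (i + 1) * section_size + i + 1 else (i + 1) * section_size + remainder
      sections ++ [PySem.List.slice tokens (some section_start) (some section_stop)]) []

-- ===== PORT B =====
def to_sections_alt (tokens : List String) (number_sections : Int) : List (List String) :=
  match PySem.Int.divmod? (PySem.List.len tokens) number_sections with
  | none => []   -- ZeroDivisionError (number_sections = 0); excluded by Pre_
  | some (section_size, remainder) =>
    let st1 := (PySem.List.pyRange 0 remainder 1).foldl
      (fun (st : List (List String) × Int) (_ : Int) =>
        let stop := st.2 + section_size + 1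
        (st.1 ++ [PySem.List.slice tokens (some st.2) (some stop)], stop))
      ([], 0)
    let st2 := (PySem.List.pyRange 0 (number_sections - remainder) 1).foldl
      (fun (st : List (List String) × Int) (_ : Int) =>
        let stop := st.2 + section_size
        (st.1 ++ [PySem.List.slice tokens (some st.2) (some stop)], stop))
      st1
    st2.1

-- ===== PRECONDITION & SPEC =====
-- Pre_ excludes exactly number_sections = 0, where Python A raises ZeroDivisionError.
def Pre_to_sections (tokens : List String) (number_sections : Int) : Prop := number_sections ≠ 0
instance (tokens : List String) (number_sections : Int) : Decidable (Pre_to_sections tokens number_sections) := by unfold Pre_to_sections; infer_instance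

def pvWitness_to_sections : List String × Int := (["a", "b", "c"], 2)

def Spec_to_sections (tokens : List String) (number_sections : Int) (out : List (List String)) : Prop := out = to_sections_alt tokens number_sections
instance (tokens : List String) (number_sections : Int) (out : List (List String)) : Decidable (Spec_to_sections tokens number_sections out) := by unfold Spec_to_sections; infer_instance

-- ===== CLAIM (what is proved, stated in full; the proofs are below) =====
def Claim_equal_to_sections : Prop := ∀ (tokens : List String) (number_sections : Int), Dom_to_sections tokens number_sections → Pre_to_sections tokens number_sections → Spec_to_sections tokens number_sections (to_sections tokens number_sections)

-- ===== LEMMAS AND PROOFS =====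

-- the k-th section, over the natural numbers
def pvSeg (tokens : List String) (sn rn k : Nat) : List String :=
  (tokens.drop (k * sn + min k rn)).take (sn + if k < rn then 1 else 0)

-- A's fold equals the map of pvSeg
lemma pvA_eq (tokens : List String) (ns : Int) (sn rn n : Nat)
    (hns : ns = (n : Int)) :
    (PySem.List.pyRange 0 ns 1).foldl (fun sections i =>
      let section_start := if i < (rn : Int) then i * (sn : Int) + i else i * (sn : Int) + (rn : Int)
      let section_stop := if i + 1 < (rn : Int) then (i + 1) * (sn : Int) + i + 1 else (i + 1) * (sn : Int) + (rn : Int)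
      sections ++ [PySem.List.slice tokens (some section_start) (some section_stop)]) []
    = (List.range n).map (pvSeg tokens sn rn) := by
  subst hns
  rw [PySem.List.pyRange_one, List.foldl_map]
  simp only []
  rw [PySem.List.foldl_append_singleton_eq_map, List.nil_append]
  apply List.map_congr_left
  intro k _
  have hstart : (if ((0:Int) + k) < (rn : Int) then ((0:Int)+k) * (sn : Int) + ((0:Int)+k) else ((0:Int)+k) * (sn : Int) + (rn : Int))
      = ((k * sn + min k rn : Nat) : Int) := by
    split_ifs with h
    · have hk : min k rn = k := Nat.min_eq_left (by omega)
      rw [hk]; push_cast; ring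
    · have hk : min k rn = rn := Nat.min_eq_right (by omega)
      rw [hk]; push_cast; ring
  have hstop : (if ((0:Int) + k) + 1 < (rn : Int) then (((0:Int)+k) + 1) * (sn : Int) + ((0:Int)+k) + 1 else (((0:Int)+k) + 1) * (sn : Int) + (rn : Int))
      = (((k + 1) * sn + min (k + 1) rn : Nat) : Int) := by
    split_ifs with h
    · have hk : min (k + 1) rn = k + 1 := Nat.min_eq_left (by omega)
      rw [hk]; push_cast; ring
    · have hk : min (k + 1) rn = rn := Nat.min_eq_right (by omega)
      rw [hk]; push_cast; ring
  simp only [hstart, hstop, PySem.List.slice_natCast, pvSeg]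
  congr 1
  by_cases hk : k < rn
  · have h1 : min k rn = k := Nat.min_eq_left hk.le
    have h2 : min (k + 1) rn = k + 1 := Nat.min_eq_left hk
    rw [h1, h2, if_pos hk]
    have : (k + 1) * sn + (k + 1) = (k * sn + k) + (sn + 1) := by ring
    omega
  · have h1 : min k rn = rn := Nat.min_eq_right (not_lt.mp hk)
    have h2 : min (k + 1) rn = rn := Nat.min_eq_right (le_trans (not_lt.mp hk) (Nat.le_succ k))
    rw [h1, h2, if_neg hk]
    have : (k + 1) * sn + rn = (k * sn + rn) + sn := by ring
    omega

-- one cursor phase of B, over an arbitrary driving list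
lemma pvPhase (tokens : List String) (w : Int) (L : List Int) :
    ∀ (acc : List (List String)) (c : Int),
    L.foldl (fun (st : List (List String) × Int) (_ : Int) =>
        (st.1 ++ [PySem.List.slice tokens (some st.2) (some (st.2 + w))], st.2 + w)) (acc, c)
      = (acc ++ (List.range L.length).map
            (fun (j : Nat) => PySem.List.slice tokens (some (c + (j : Int) * w)) (some (c + (j : Int) * w + w))),
         c + (L.length : Int) * w) := by
  induction L with
  | nil => intro acc c; simp
  | cons x xs ih =>
    intro acc c
    simp only [List.foldl_cons]
    rw [ih]
    simp only [Prod.mk.injEq]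
    refine ⟨?_, ?_⟩
    · rw [List.append_assoc]
      congr 1
      rw [List.length_cons, List.range_succ_eq_map, List.map_cons, List.map_map]
      simp only [List.singleton_append, Nat.cast_zero]
      congr 1
      · congr 2 <;> ring
      · apply List.map_congr_left
        intro j _
        simp only [Function.comp, Nat.succ_eq_add_one]
        congr 2 <;> push_cast <;> ring
    · simp only [List.length_cons]
      push_cast; ring

-- B's two phases equal the map of pvSeg
lemma pvB_eq (tokens : List String) (ns : Int) (sn rn n : Nat)
    (hns : ns = (n : Int)) (hrn : rn ≤ n) :
    ((PySem.List.pyRange 0 (ns - (rn : Int)) 1).foldl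
      (fun (st : List (List String) × Int) (_ : Int) =>
        (st.1 ++ [PySem.List.slice tokens (some st.2) (some (st.2 + (sn : Int)))], st.2 + (sn : Int)))
      ((PySem.List.pyRange 0 (rn : Int) 1).foldl
        (fun (st : List (List String) × Int) (_ : Int) =>
          (st.1 ++ [PySem.List.slice tokens (some st.2) (some (st.2 + (sn : Int) + 1))], st.2 + (sn : Int) + 1))
        ([], 0))).1
    = (List.range n).map (pvSeg tokens sn rn) := by
  subst hns
  simp only [add_assoc]
  rw [pvPhase tokens ((sn : Int) + 1) (PySem.List.pyRange 0 (rn : Int) 1) [] 0]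
  rw [pvPhase tokens (sn : Int) (PySem.List.pyRange 0 ((n : Int) - (rn : Int)) 1)]
  have hlen1 : (PySem.List.pyRange 0 (rn : Int) 1).length = rn := by
    rw [PySem.List.length_pyRange_one]; simp
  have hlen2 : (PySem.List.pyRange 0 ((n : Int) - (rn : Int)) 1).length = n - rn := by
    rw [PySem.List.length_pyRange_one]; omega
  rw [hlen1, hlen2]
  simp only [List.nil_append]
  have hsplit : n = rn + (n - rn) := by omega
  conv_rhs => rw [hsplit, List.range_add]
  rw [List.map_append, List.map_map]
  congr 1
  · apply List.map_congr_left
    intro j hj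
    rw [List.mem_range] at hj
    have hc : (0 : Int) + (j : Int) * ((sn : Int) + 1) = ((j * (sn + 1) : Nat) : Int) := by push_cast; ring
    have hc2 : (0 : Int) + (j : Int) * ((sn : Int) + 1) + ((sn : Int) + 1) = ((j * (sn + 1) + (sn + 1) : Nat) : Int) := by push_cast; ring
    rw [hc2, hc, PySem.List.slice_natCast, pvSeg]
    have h1 : min j rn = j := Nat.min_eq_left hj.le
    have hd : j * sn + j = j * (sn + 1) := by ring
    have ht : j * (sn + 1) + (sn + 1) - j * (sn + 1) = sn + 1 := by omega
    rw [h1, if_pos hj, hd, ht]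
  · apply List.map_congr_left
    intro j hj
    rw [List.mem_range] at hj
    simp only [Function.comp]
    have hc : (0 : Int) + (rn : Int) * ((sn : Int) + 1) + (j : Int) * (sn : Int) = ((rn * (sn + 1) + j * sn : Nat) : Int) := by push_cast; ring
    have hc2 : (0 : Int) + (rn : Int) * ((sn : Int) + 1) + (j : Int) * (sn : Int) + (sn : Int) = ((rn * (sn + 1) + j * sn + sn : Nat) : Int) := by push_cast; ring
    rw [hc2, hc, PySem.List.slice_natCast, pvSeg]
    have hge : ¬ (rn + j < rn) := by omega
    have h1 : min (rn + j) rn = rn := Nat.min_eq_right (by omega)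
    have hd : (rn + j) * sn + rn = rn * (sn + 1) + j * sn := by ring
    have ht : rn * (sn + 1) + j * sn + sn - (rn * (sn + 1) + j * sn) = sn + 0 := by omega
    rw [h1, if_neg hge, hd, ht]

-- ===== VERDICT (by name: the statement is the Claim_ definition above) =====
theorem to_sections_spec : Claim_equal_to_sections := by
  intro tokens ns _hdom hpre
  unfold Spec_to_sections to_sections to_sections_alt
  unfold PySem.Int.divmod?
  rw [if_neg hpre]
  simp only []
  rcases lt_trichotomy ns 0 with hneg | hzero | hpos
  · -- negative number of sections: all three ranges are empty
    have hr := PySem.Int.mod_neg_bounds (PySem.List.len tokens) hneg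
    have hmod : (PySem.List.len tokens).fmod ns = PySem.Int.mod (PySem.List.len tokens) ns := rfl
    rw [PySem.List.pyRange_one_eq_nil (by omega),
        PySem.List.pyRange_one_eq_nil (by rw [hmod]; omega),
        PySem.List.pyRange_one_eq_nil (by rw [hmod]; omega)]
    simp
  · exact absurd hzero hpre
  · -- positive number of sections
    have hlen : (0 : Int) ≤ PySem.List.len tokens := by
      simp [PySem.List.len_eq]
    set s := (PySem.List.len tokens).fdiv ns with hsdef
    set r := (PySem.List.len tokens).fmod ns with hrdef
    have hs : 0 ≤ s := by
      rw [hsdef]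
      exact (PySem.Int.le_floordiv_iff_mul_le hpos).mpr (by simpa using hlen)
    have hr0 : 0 ≤ r := by
      rw [hrdef]; exact PySem.Int.mod_nonneg _ hpos
    have hrlt : r < ns := by
      rw [hrdef]; exact PySem.Int.mod_lt _ hpos
    have hscast : s = ((s.toNat : Nat) : Int) := by omega
    have hrcast : r = ((r.toNat : Nat) : Int) := by omega
    have hncast : ns = ((ns.toNat : Nat) : Int) := by omega
    rw [hscast, hrcast, hncast]
    rw [pvA_eq tokens _ s.toNat r.toNat ns.toNat rfl]
    rw [pvB_eq tokens _ s.toNat r.toNat ns.toNat rfl (by omega)]
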